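-- pv_equiv track=rewrite | github.com/konsatanasoff/python-advanced-january-2021 | tuples_and_sets/lab/softuni_party.py | vip_regular_separation
-- ===== SOURCE A (Python) =====
-- def is_vip_check(guest):
--     return guest[0].isdigit()
--
-- def vip_regular_separation(guests):
--     vip_guests = []
--     regular_guests = []
--     for guest in guests:
--         if is_vip_check(guest):
--             vip_guests.append(guest)
--         else:
--             regular_guests.append(guest)
--     return sorted(vip_guests), sorted(regular_guests)
-- ===== SOURCE B (Python) =====
-- def _insert_sorted(lst, x):
--     """Return lst with x inserted at its sorted position (after equal elements)."""
--     for i, y in enumerate(lst):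
--         if x < y:
--             return lst[:i] + [x] + lst[i:]
--     return lst + [x]
--
-- def vip_regular_separation(guests):
--     vip_guests = []
--     regular_guests = []
--     for guest in guests:
--         if guest[0].isdigit():
--             vip_guests = _insert_sorted(vip_guests, guest)
--         else:
--             regular_guests = _insert_sorted(regular_guests, guest)
--     return vip_guests, regular_guests
-- ===== Notes on version B (the rewrite author's own statement) =====
-- stated objective: alternative
-- what changed: B never calls sorted(): it maintains the two result lists in sorted order incrementally, inserting each guest at its sorted position in a single pass (incremental insertion sort) instead of partitioning and then sorting each group.
import Mathlib
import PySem

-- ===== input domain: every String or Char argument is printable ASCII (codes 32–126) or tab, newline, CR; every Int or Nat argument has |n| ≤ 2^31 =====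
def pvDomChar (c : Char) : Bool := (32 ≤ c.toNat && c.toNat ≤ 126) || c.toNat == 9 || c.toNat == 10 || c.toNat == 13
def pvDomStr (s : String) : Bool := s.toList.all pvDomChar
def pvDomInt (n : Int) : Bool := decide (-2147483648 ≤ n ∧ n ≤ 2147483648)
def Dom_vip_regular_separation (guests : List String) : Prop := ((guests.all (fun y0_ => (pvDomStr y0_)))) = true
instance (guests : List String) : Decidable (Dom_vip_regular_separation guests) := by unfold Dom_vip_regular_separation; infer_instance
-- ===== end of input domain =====

-- B replaces partition-then-sort by a single pass that inserts each guest at its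
-- sorted position in its group (incremental insertion sort; no sorted() call).
-- ===== PORT A =====
def is_vip_check (guest : String) : Bool :=
  match PySem.Str.pyGet? guest 0 with
  | some c => PySem.Chars.isdigit c
  | none => false   -- Python raises IndexError here (empty guest); excluded by Pre_

def vip_regular_separation (guests : List String) : List String × List String :=
  let acc := guests.foldl
    (fun (acc : List String × List String) guest =>
      if is_vip_check guest then (acc.1 ++ [guest], acc.2) else (acc.1, acc.2 ++ [guest]))
    ([], [])
  (PySem.List.sorted acc.1 (fun x => x) false, PySem.List.sorted acc.2 (fun x => x) false)

-- ===== PORT B =====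
-- _insert_sorted: scan for the first element greater than x, insert x before it.
def insertSortedB (lst : List String) (x : String) : List String :=
  match lst with
  | [] => [x]
  | y :: ys => if x < y then x :: y :: ys else y :: insertSortedB ys x

def vip_regular_separation_alt (guests : List String) : List String × List String :=
  guests.foldl
    (fun (acc : List String × List String) guest =>
      match PySem.Str.pyGet? guest 0 with
      | some c =>
        if PySem.Chars.isdigit c then (insertSortedB acc.1 guest, acc.2)
        else (acc.1, insertSortedB acc.2 guest)
      | none => (acc.1, insertSortedB acc.2 guest))  -- Python raises IndexError here; excluded by Pre_
    ([], [])

-- ===== PRECONDITION & SPEC =====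
-- Pre_ excludes exactly the inputs containing an empty guest string, where guest[0] raises IndexError in both A and B.
def Pre_vip_regular_separation (guests : List String) : Prop := "" ∉ guests
instance (guests : List String) : Decidable (Pre_vip_regular_separation guests) := by unfold Pre_vip_regular_separation; infer_instance
def pvWitness_vip_regular_separation : List String := ["1a", "bob", "22", "Alice"]

def Spec_vip_regular_separation (guests : List String) (out : List String × List String) : Prop := out = vip_regular_separation_alt guests
instance (guests : List String) (out : List String × List String) : Decidable (Spec_vip_regular_separation guests out) := by unfold Spec_vip_regular_separation; infer_instance

-- ===== CLAIM (what is proved, stated in full; the proofs are below) =====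
def Claim_equal_vip_regular_separation : Prop := ∀ (guests : List String), Dom_vip_regular_separation guests → Pre_vip_regular_separation guests → Spec_vip_regular_separation guests (vip_regular_separation guests)

-- ===== LEMMAS AND PROOFS =====

-- insertSortedB produces a permutation of x :: lst
theorem insertSortedB_perm (lst : List String) (x : String) :
    (insertSortedB lst x).Perm (x :: lst) := by
  induction lst with
  | nil => simp [insertSortedB]
  | cons y ys ih =>
    unfold insertSortedB
    split_ifs
    · exact List.Perm.refl _
    · exact ((ih.cons y).trans (List.Perm.swap x y ys))

theorem mem_insertSortedB {z : String} (lst : List String) (x : String) :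
    z ∈ insertSortedB lst x ↔ z = x ∨ z ∈ lst := by
  rw [(insertSortedB_perm lst x).mem_iff]; simp

-- insertSortedB preserves sortedness
theorem insertSortedB_pairwise (lst : List String) (x : String)
    (h : lst.Pairwise (· ≤ ·)) : (insertSortedB lst x).Pairwise (· ≤ ·) := by
  induction lst with
  | nil => simp [insertSortedB]
  | cons y ys ih =>
    rw [List.pairwise_cons] at h
    unfold insertSortedB
    split_ifs with hlt
    · refine List.pairwise_cons.mpr ⟨?_, List.pairwise_cons.mpr h⟩
      intro z hz
      rcases List.mem_cons.mp hz with rfl | hz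
      · exact le_of_lt hlt
      · exact le_trans (le_of_lt hlt) (h.1 z hz)
    · refine List.pairwise_cons.mpr ⟨?_, ih h.2⟩
      intro z hz
      rcases (mem_insertSortedB ys x).mp hz with rfl | hz
      · exact le_of_not_gt (by simpa using hlt)
      · exact h.1 z hz

-- the B-side fold over one group: sorted & a permutation of acc ++ ys
theorem foldl_insertSortedB_perm (ys : List String) :
    ∀ (acc : List String), (ys.foldl insertSortedB acc).Perm (acc ++ ys) := by
  induction ys with
  | nil => simp
  | cons y ys ih =>
    intro acc
    refine (ih (insertSortedB acc y)).trans ?_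
    refine ((insertSortedB_perm acc y).append_right ys).trans ?_
    simpa using (List.perm_middle (a := y) (l₁ := acc) (l₂ := ys)).symm

theorem foldl_insertSortedB_pairwise (ys : List String) :
    ∀ (acc : List String), acc.Pairwise (· ≤ ·) →
      (ys.foldl insertSortedB acc).Pairwise (· ≤ ·) := by
  induction ys with
  | nil => intro acc h; simpa using h
  | cons y ys ih =>
    intro acc h
    exact ih _ (insertSortedB_pairwise acc y h)

-- isort = Python sorted on strings
theorem foldl_insertSortedB_eq_sorted (ys : List String) :
    ys.foldl insertSortedB [] = PySem.List.sorted ys (fun x => x) false := by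
  refine (PySem.List.sorted_id_eq_of_perm_of_pairwise _ _ ?_ ?_).symm
  · simpa using foldl_insertSortedB_perm ys []
  · exact foldl_insertSortedB_pairwise ys [] (by simp)

-- the B-side loop body, expressed through is_vip_check
theorem step_eq (acc : List String × List String) (guest : String) :
    (match PySem.Str.pyGet? guest 0 with
      | some c =>
        if PySem.Chars.isdigit c then (insertSortedB acc.1 guest, acc.2)
        else (acc.1, insertSortedB acc.2 guest)
      | none => (acc.1, insertSortedB acc.2 guest))
      = if is_vip_check guest then (insertSortedB acc.1 guest, acc.2)
        else (acc.1, insertSortedB acc.2 guest) := by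
  unfold is_vip_check
  cases PySem.Str.pyGet? guest 0 <;> simp

-- B's pair loop splits into two independent folds over the two filtered sublists
theorem alt_loop_split (ys : List String) :
    ∀ (a b : List String),
      ys.foldl
        (fun (acc : List String × List String) guest =>
          if is_vip_check guest then (insertSortedB acc.1 guest, acc.2)
          else (acc.1, insertSortedB acc.2 guest)) (a, b)
        = ((ys.filter is_vip_check).foldl insertSortedB a,
           (ys.filter (fun g => !is_vip_check g)).foldl insertSortedB b) := by
  induction ys with
  | nil => simp
  | cons y ys ih =>
    intro a b
    simp only [List.foldl_cons, List.filter_cons]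
    by_cases hv : is_vip_check y = true
    · simp [ih, hv]
    · simp [ih, hv]

-- A's partition loop computes the two filters of the list it runs over
theorem loop_eq_filters (ys : List String) :
    ys.foldl
      (fun (acc : List String × List String) guest =>
        if is_vip_check guest then (acc.1 ++ [guest], acc.2) else (acc.1, acc.2 ++ [guest]))
      ([], [])
      = (ys.filter is_vip_check, ys.filter (fun g => !is_vip_check g)) := by
  suffices h : ∀ (a b : List String), ys.foldl
      (fun (acc : List String × List String) guest =>
        if is_vip_check guest then (acc.1 ++ [guest], acc.2) else (acc.1, acc.2 ++ [guest])) (a, b)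
      = (a ++ ys.filter is_vip_check, b ++ ys.filter (fun g => !is_vip_check g)) by
    simpa using h [] []
  induction ys with
  | nil => simp
  | cons y ys ih =>
    intro a b
    simp only [List.foldl_cons, List.filter_cons]
    by_cases hv : is_vip_check y = true
    · simp [ih, hv]
    · simp [ih, hv]

-- ===== VERDICT (by name: the statement is the Claim_ definition above) =====
theorem vip_regular_separation_spec : Claim_equal_vip_regular_separation := by
  intro guests _ _
  unfold Spec_vip_regular_separation vip_regular_separation vip_regular_separation_alt
  rw [show (fun (acc : List String × List String) guest =>
      match PySem.Str.pyGet? guest 0 with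
      | some c =>
        if PySem.Chars.isdigit c then (insertSortedB acc.1 guest, acc.2)
        else (acc.1, insertSortedB acc.2 guest)
      | none => (acc.1, insertSortedB acc.2 guest))
      = (fun (acc : List String × List String) guest =>
        if is_vip_check guest then (insertSortedB acc.1 guest, acc.2)
        else (acc.1, insertSortedB acc.2 guest))
    from funext fun acc => funext fun guest => step_eq acc guest]
  rw [alt_loop_split, loop_eq_filters,
    foldl_insertSortedB_eq_sorted, foldl_insertSortedB_eq_sorted]
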